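-- pv_equiv track=rewrite | github.com/retracesoftware/retracesoftware | tests/test_run_to_cursor.py | _run_to_cursor_prev
-- ===== SOURCE A (Python) =====
-- def _run_to_cursor_prev(function_counts):
--     """Compute the function_counts to pass to run_to_return in order to
--     reach `function_counts` via a subsequent next_instruction loop.
--
--     The result is padded to the same depth as the target so that
--     check_exit_slot (which requires cursor_stack.size() == target.size())
--     matches the correct sibling call, not the parent.
--
--     For target [8,3,2] returns [8,3,1].
--     For target [8,3,0] returns [8,2,0] (go up one level, pad with 0).
--     For target [0] returns None (already at start).
--     """
--     for i in range(len(function_counts) - 1, -1, -1):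
--         if function_counts[i] > 0:
--             prev = list(function_counts[:i + 1])
--             prev[i] -= 1
--             while len(prev) < len(function_counts):
--                 prev.append(0)
--             return prev
--     return None
-- ===== SOURCE B (Python) =====
-- def _run_to_cursor_prev(function_counts):
--     out = []
--     found = False
--     for c in reversed(function_counts):
--         if found:
--             out.append(c)
--         elif c > 0:
--             out.append(c - 1)
--             found = True
--         else:
--             out.append(0)
--     if not found:
--         return None
--     out.reverse()
--     return out
-- ===== Notes on version B (the rewrite author's own statement) =====
-- stated objective: alternative
-- what changed: Replaced A's backward index scan with early return, prefix slice, in-place decrement and while-loop zero padding by a single fused fold over reversed(function_counts) with a found-flag state machine that builds the whole output back-to-front and reverses it once at the end.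
import Mathlib
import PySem

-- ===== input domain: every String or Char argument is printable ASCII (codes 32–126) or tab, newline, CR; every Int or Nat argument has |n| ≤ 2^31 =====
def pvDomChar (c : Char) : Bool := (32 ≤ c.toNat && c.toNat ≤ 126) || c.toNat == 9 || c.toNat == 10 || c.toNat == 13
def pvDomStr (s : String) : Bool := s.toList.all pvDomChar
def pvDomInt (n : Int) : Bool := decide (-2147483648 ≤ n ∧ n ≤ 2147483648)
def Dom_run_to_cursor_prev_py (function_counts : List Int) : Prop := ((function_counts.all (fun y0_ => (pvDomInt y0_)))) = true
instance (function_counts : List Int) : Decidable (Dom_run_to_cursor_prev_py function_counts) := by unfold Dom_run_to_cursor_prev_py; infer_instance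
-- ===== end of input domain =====

-- B replaces A's backward index scan + slice/decrement/while-padding by one fused fold over
-- the reversed list with a found-flag, building the output back-to-front (alternative decomposition).

-- ===== PORT A =====
-- the 'while len(prev) < len(function_counts): prev.append(0)' loop
def pvPad (n : Nat) (prev : List Int) : List Int :=
  if prev.length < n then pvPad n (prev ++ [0]) else prev
termination_by n - prev.length
decreasing_by simp; omega

-- the 'for i in range(len(function_counts)-1, -1, -1)' loop with its early return
def pvALoop (fc : List Int) : List Int → Option (List Int)
  | [] => none
  | i :: rest =>
    if PySem.List.pyGetD fc i 0 > 0 then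
      let prev := PySem.List.slice fc none (some (i + 1))
      let prev := prev.set i.toNat (PySem.List.pyGetD prev i 0 - 1)
      some (pvPad fc.length prev)
    else pvALoop fc rest

def run_to_cursor_prev_py (function_counts : List Int) : Option (List Int) :=
  pvALoop function_counts (PySem.List.pyRange ((function_counts.length : Int) - 1) (-1) (-1))

-- ===== PORT B =====
-- body of the 'for c in reversed(function_counts)' loop: state = (out, found)
def pvBStep (st : List Int × Bool) (c : Int) : List Int × Bool :=
  if st.2 then (st.1 ++ [c], true)
  else if c > 0 then (st.1 ++ [c - 1], true)
  else (st.1 ++ [0], false)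

def run_to_cursor_prev_py_alt (function_counts : List Int) : Option (List Int) :=
  let st := function_counts.reverse.foldl pvBStep ([], false)
  if !st.2 then none else some st.1.reverse

-- ===== PRECONDITION & SPEC =====
def Spec_run_to_cursor_prev_py (function_counts : List Int) (out : Option (List Int)) : Prop := out = run_to_cursor_prev_py_alt function_counts
instance (function_counts : List Int) (out : Option (List Int)) : Decidable (Spec_run_to_cursor_prev_py function_counts out) := by unfold Spec_run_to_cursor_prev_py; infer_instance

-- ===== CLAIM (what is proved, stated in full; the proofs are below) =====
def Claim_equal_run_to_cursor_prev_py : Prop := ∀ (function_counts : List Int), Dom_run_to_cursor_prev_py function_counts → Spec_run_to_cursor_prev_py function_counts (run_to_cursor_prev_py function_counts)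

-- ===== LEMMAS AND PROOFS =====

-- common structural specification: process the list from the right
def pvGoR : List Int → Option (List Int)
  | [] => none
  | x :: r => if x > 0 then some ((x - 1) :: r) else (pvGoR r).map (0 :: ·)

def pvSpecF (fc : List Int) : Option (List Int) := (pvGoR fc.reverse).map List.reverse

lemma pvPad_spec (n : Nat) (p : List Int) : pvPad n p = p ++ List.replicate (n - p.length) 0 := by
  generalize hk : n - p.length = k
  induction k generalizing p with
  | zero =>
    rw [pvPad, if_neg (by omega)]
    simp
  | succ k ih =>
    rw [pvPad, if_pos (by omega)]
    rw [ih (p ++ [0]) (by simp; omega)]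
    simp [List.replicate_succ]

lemma pvALoop_append (fc : List Int) (x : Int) :
    ∀ idxs, (∀ i ∈ idxs, 0 ≤ i ∧ i < (fc.length : Int)) →
      pvALoop (fc ++ [x]) idxs = (pvALoop fc idxs).map (· ++ [0]) := by
  intro idxs h
  induction idxs with
  | nil => rfl
  | cons i rest ih =>
    obtain ⟨⟨h0, hlt⟩, hrest⟩ := List.forall_mem_cons.mp h
    have hi : i.toNat < fc.length := by omega
    have hget : PySem.List.pyGetD (fc ++ [x]) i 0 = PySem.List.pyGetD fc i 0 := by
      rw [PySem.List.pyGetD_eq_getElem _ _ h0 (by simp; omega),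
          PySem.List.pyGetD_eq_getElem _ _ h0 (by omega)]
      exact List.getElem_append_left hi
    have hslice : PySem.List.slice (fc ++ [x]) none (some (i + 1)) =
        PySem.List.slice fc none (some (i + 1)) := by
      rw [PySem.List.slice_to _ (by omega), PySem.List.slice_to _ (by omega)]
      have hle : (i + 1).toNat ≤ fc.length := by omega
      exact List.take_append_of_le_length hle
    simp only [pvALoop, hget, hslice]
    split
    · set prev := (PySem.List.slice fc none (some (i + 1))).set i.toNat
        (PySem.List.pyGetD (PySem.List.slice fc none (some (i + 1))) i 0 - 1) with hprev
      have hlen : prev.length ≤ fc.length := by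
        simp [hprev, PySem.List.slice_to _ (show (0:Int) ≤ i + 1 by omega)]
      have hpad : pvPad (fc.length + 1) prev = pvPad fc.length prev ++ [0] := by
        rw [pvPad_spec, pvPad_spec]
        have h2 : (fc.length + 1) - prev.length = (fc.length - prev.length) + 1 := by
          omega
        rw [h2, List.replicate_succ', ← List.append_assoc]
      simp [hpad]
    · exact ih hrest

lemma pvA_eq_spec (fc : List Int) : run_to_cursor_prev_py fc = pvSpecF fc := by
  induction fc using List.reverseRecOn with
  | nil =>
    rw [run_to_cursor_prev_py,
        PySem.List.pyRange_neg_one_eq_nil (by norm_num : ((List.length ([] : List Int) : Int)) - 1 ≤ -1)]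
    rfl
  | append_singleton fc x ih =>
    have hlen : ((fc ++ [x]).length : Int) - 1 = (fc.length : Int) := by simp
    rw [run_to_cursor_prev_py, hlen,
        PySem.List.pyRange_neg_one_cons (by omega : (-1:Int) < (fc.length : Int))]
    have hget : PySem.List.pyGetD (fc ++ [x]) (fc.length : Int) 0 = x := by
      rw [PySem.List.pyGetD_eq_getElem _ _ (by omega) (by simp)]
      simp
    simp only [pvALoop, hget]
    by_cases hx : x > 0
    · rw [if_pos hx]
      have hslice : PySem.List.slice (fc ++ [x]) none (some ((fc.length : Int) + 1)) = fc ++ [x] := by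
        rw [PySem.List.slice_to _ (by omega)]
        have h3 : ((fc.length : Int) + 1).toNat = fc.length + 1 := by omega
        simp [h3]
      have hset : (fc ++ [x]).set (fc.length : Int).toNat (x - 1) = fc ++ [x - 1] := by
        have h4 : (fc.length : Int).toNat = fc.length := by omega
        rw [h4, List.set_append_right _ _ (le_refl _)]
        simp
      simp only [hslice, hget, hset]
      have hpad : pvPad (fc ++ [x]).length (fc ++ [x - 1]) = fc ++ [x - 1] := by
        rw [pvPad_spec]; simp
      rw [hpad, pvSpecF]
      simp [pvGoR, hx]
    · rw [if_neg hx]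
      have hmem : ∀ i ∈ PySem.List.pyRange ((fc.length : Int) - 1) (-1) (-1),
          0 ≤ i ∧ i < (fc.length : Int) := by
        intro i hi
        rw [PySem.List.mem_pyRange_neg_one] at hi
        omega
      rw [pvALoop_append fc x _ hmem]
      have h5 : pvALoop fc (PySem.List.pyRange ((fc.length : Int) - 1) (-1) (-1)) = pvSpecF fc := by
        rw [← ih, run_to_cursor_prev_py]
      rw [h5, pvSpecF, pvSpecF]
      simp only [List.reverse_append, List.reverse_singleton, List.singleton_append, pvGoR,
        if_neg hx, Option.map_map]
      cases pvGoR fc.reverse <;> simp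

-- once the flag is set B's loop only copies the remaining elements
lemma pvBStep_found (out : List Int) (l : List Int) :
    l.foldl pvBStep (out, true) = (out ++ l, true) := by
  induction l generalizing out with
  | nil => simp
  | cons c r ih => simp [pvBStep, ih]

-- B's loop from an unset flag, characterised by the right-process spec
lemma pvBStep_unfound (out : List Int) (l : List Int) :
    l.foldl pvBStep (out, false) =
      match pvGoR l with
      | none => (out ++ List.replicate l.length 0, false)
      | some res => (out ++ res, true) := by
  induction l generalizing out with
  | nil => simp [pvGoR]
  | cons c r ih =>
    by_cases hc : c > 0
    · simp [pvBStep, hc, pvGoR, pvBStep_found]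
    · simp only [List.foldl_cons, pvBStep, if_neg hc]
      rw [if_neg (by simp : ¬(false = true)), ih (out ++ [0])]
      simp only [pvGoR, if_neg hc]
      cases h : pvGoR r with
      | none => simp [List.replicate_succ]
      | some res => simp

lemma pvB_eq_spec (fc : List Int) : run_to_cursor_prev_py_alt fc = pvSpecF fc := by
  rw [run_to_cursor_prev_py_alt, pvSpecF]
  simp only [pvBStep_unfound]
  cases h : pvGoR fc.reverse with
  | none => simp
  | some res => simp

-- ===== VERDICT (by name: the statement is the Claim_ definition above) =====
theorem run_to_cursor_prev_py_spec : Claim_equal_run_to_cursor_prev_py := by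
  intro fc _
  unfold Spec_run_to_cursor_prev_py
  rw [pvA_eq_spec, pvB_eq_spec]
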